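-- pv_equiv track=rewrite | github.com/grant-dot-dev/advent_of_code_2024 | Day19_Python/part1.py | count_arrangements
-- ===== SOURCE A (Python) =====
-- def count_arrangements(design, towels, memo_count):
--
--     if design in memo_count:
--         return memo_count[design]
--
--     if design == "":
--         return 1
--
--     total_ways = 0
--     for towel in towels:
--         if design.startswith(towel):  # Check if towel matches the start of design
--             remainder = design[len(towel):]
--             total_ways += count_arrangements(remainder, towels, memo_count)
--
--     memo_count[design] = total_ways  # Cache the result
--     return total_ways
-- ===== SOURCE B (Python) =====
-- def count_arrangements(design, towels, memo_count):
--     if design in memo_count: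
--         return memo_count[design]
--     n = len(design)
--     dp = [0] * (n + 1)
--     dp[n] = memo_count.get("", 1)
--     for i in range(n - 1, -1, -1):
--         suf = design[i:]
--         if suf in memo_count:
--             dp[i] = memo_count[suf]
--         else:
--             dp[i] = sum(dp[i + len(t)] for t in towels if t and design.startswith(t, i))
--             memo_count[suf] = dp[i]
--     return dp[0]
-- ===== Notes on version B (the rewrite author's own statement) =====
-- stated objective: alternative
-- what changed: Replaces A's top-down memoised recursion over suffixes by a single iterative backward bottom-up DP pass over suffix start positions (no recursion).
-- outside the precondition, e.g. on count_arrangements('ab', ['', 'a', 'b'], {}): A raises RecursionError, B returns 1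
import Mathlib
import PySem

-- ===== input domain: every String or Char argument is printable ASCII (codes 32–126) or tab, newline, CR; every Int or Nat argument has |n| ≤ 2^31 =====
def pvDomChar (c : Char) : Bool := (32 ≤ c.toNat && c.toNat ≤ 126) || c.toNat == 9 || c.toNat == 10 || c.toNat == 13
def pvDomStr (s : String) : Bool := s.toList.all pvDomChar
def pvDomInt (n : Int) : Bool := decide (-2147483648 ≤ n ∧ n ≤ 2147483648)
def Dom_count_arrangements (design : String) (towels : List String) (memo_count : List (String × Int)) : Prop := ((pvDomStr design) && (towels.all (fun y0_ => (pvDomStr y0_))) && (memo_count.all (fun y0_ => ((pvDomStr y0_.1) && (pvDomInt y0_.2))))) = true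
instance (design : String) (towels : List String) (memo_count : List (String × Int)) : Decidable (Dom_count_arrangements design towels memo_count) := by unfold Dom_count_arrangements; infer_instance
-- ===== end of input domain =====

-- B replaces A's top-down memoised recursion by a single backward bottom-up DP pass over
-- suffix start positions (objective: alternative decomposition); equivalence is about the
-- RETURN value only — both Pythons mutate memo_count, but A caches exactly the reachable
-- uncached suffixes while B caches every uncached non-empty suffix (a superset, same values).

-- the memo dict (Python str keys) as a PySem.Dict over List Char, shared input conversion
def pvToMemo (memo_count : List (String × Int)) : PySem.Dict (List Char) Int :=
  PySem.Dict.mk (memo_count.map (fun p => (p.1.toList, p.2)))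

-- ===== PORT A =====
-- A's recursion, on List Char; the fuel is a totality device only: under
-- Pre_ every towel consumed is non-empty, so depth ≤ design.length and fuel
-- design.length + 1 is never exhausted.  design[len(towel):] = List.drop
-- (PySem.List.slice_from_natCast).  Threaded second component = the mutated memo.
def pvARun (towels : List (List Char)) : Nat → List Char → PySem.Dict (List Char) Int → Int × PySem.Dict (List Char) Int
  | 0, _, memo => (0, memo)
  | fuel+1, design, memo =>
    match memo.get? design with
    | some v => (v, memo)                                   -- if design in memo_count: return memo_count[design]
    | none =>
      if design = [] then (1, memo)                         -- if design == "": return 1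
      else
        let r := towels.foldl                               -- for towel in towels: …
          (fun (acc : Int × PySem.Dict (List Char) Int) towel =>
            if PySem.Chars.startswith design towel then
              let p := pvARun towels fuel (design.drop towel.length) acc.2
              (acc.1 + p.1, p.2)                            -- total_ways += count_arrangements(remainder, …)
            else acc)
          (0, memo)
        (r.1, r.2.insert design r.1)                        -- memo_count[design] = total_ways; return total_ways

def count_arrangements (design : String) (towels : List String) (memo_count : List (String × Int)) : Int :=
  (pvARun (towels.map String.toList) (design.toList.length + 1) design.toList (pvToMemo memo_count)).1

-- ===== PORT B =====
-- Source B's dp array, built by the backward loop: pvDp s is [dp[i], dp[i+1], …, dp[n]] for the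
-- suffix s starting at position i, so dp[i + len(t)] is (pvDp rest).getD (t.length - 1) 0.
-- Source B's memo writes happen after each dp[i] is computed and are never read back by the
-- same call (all keys written are longer suffixes), so the returned value ignores them.
def pvDp (towels : List (List Char)) (memo : PySem.Dict (List Char) Int) : List Char → List Int
  | [] => [memo.getD [] 1]                                  -- dp[n] = memo_count.get("", 1)
  | c :: rest =>
    let prev := pvDp towels memo rest
    let v :=
      match memo.get? (c :: rest) with
      | some w => w                                         -- if suf in memo_count: dp[i] = memo_count[suf]
      | none =>                                             -- dp[i] = sum(dp[i+len(t)] for t in towels if t and design.startswith(t, i))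
        ((towels.filter (fun t => !t.isEmpty && PySem.Chars.startswith (c :: rest) t)).map
          (fun t => prev.getD (t.length - 1) 0)).sum
    v :: prev

def count_arrangements_alt (design : String) (towels : List String) (memo_count : List (String × Int)) : Int :=
  match (pvToMemo memo_count).get? design.toList with
  | some v => v                                             -- if design in memo_count: return memo_count[design]
  | none => (pvDp (towels.map String.toList) (pvToMemo memo_count) design.toList).getD 0 0   -- return dp[0]

-- ===== PRECONDITION & SPEC =====
-- A recurses forever (Python: RecursionError) when "" is a towel and design is non-empty
-- and not already cached; Pre_ excludes exactly those inputs, on which A never returns.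
def Pre_count_arrangements (design : String) (towels : List String) (memo_count : List (String × Int)) : Prop :=
  design = "" ∨ design ∈ memo_count.map Prod.fst ∨ "" ∉ towels
instance (design : String) (towels : List String) (memo_count : List (String × Int)) : Decidable (Pre_count_arrangements design towels memo_count) := by unfold Pre_count_arrangements; infer_instance

def pvWitness_count_arrangements : String × List String × (List (String × Int)) :=
  ("abcab", ["a", "b", "c", "ab", "ca"], [("cb", 7)])

def Spec_count_arrangements (design : String) (towels : List String) (memo_count : List (String × Int)) (out : Int) : Prop := out = count_arrangements_alt design towels memo_count
instance (design : String) (towels : List String) (memo_count : List (String × Int)) (out : Int) : Decidable (Spec_count_arrangements design towels memo_count out) := by unfold Spec_count_arrangements; infer_instance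

-- ===== CLAIM (what is proved, stated in full; the proofs are below) =====
def Claim_equal_count_arrangements : Prop := ∀ (design : String) (towels : List String) (memo_count : List (String × Int)), Dom_count_arrangements design towels memo_count → Pre_count_arrangements design towels memo_count → Spec_count_arrangements design towels memo_count (count_arrangements design towels memo_count)

-- ===== LEMMAS AND PROOFS =====

-- The common reference value: the memoised count function, defined by well-founded
-- recursion on the suffix length (empty towels are filtered out, so every recursive
-- call strictly shortens the suffix).
def pvF (towels : List (List Char)) (memo : PySem.Dict (List Char) Int) (s : List Char) : Int :=
  match memo.get? s with
  | some v => v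
  | none =>
    if s = [] then 1
    else
      ((towels.filter (fun t => !t.isEmpty && PySem.Chars.startswith s t)).attach.map
        (fun t => pvF towels memo (s.drop t.1.length))).sum
termination_by s.length
decreasing_by
  have ht := t.2
  rw [List.mem_filter] at ht
  obtain ⟨-, hc⟩ := ht
  simp only [Bool.and_eq_true, Bool.not_eq_true'] at hc
  have h1 : t.1 ≠ [] := by
    intro h; rw [h] at hc; simp [List.isEmpty] at hc
  have h2 : t.1.length ≤ s.length := by
    have := hc.2
    simp [PySem.Chars.startswith] at this
    exact this.length_le
  have h0 : 0 < t.1.length := List.length_pos_iff.mpr h1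
  simp only [List.length_drop]
  omega

lemma pvF_cached {towels : List (List Char)} {memo : PySem.Dict (List Char) Int} {s : List Char}
    {v : Int} (h : memo.get? s = some v) : pvF towels memo s = v := by
  rw [pvF, h]

lemma pvF_sum {towels : List (List Char)} {memo : PySem.Dict (List Char) Int} {s : List Char}
    (hm : memo.get? s = none) (hs : s ≠ []) :
    pvF towels memo s =
      ((towels.filter (fun t => !t.isEmpty && PySem.Chars.startswith s t)).map
        (fun t => pvF towels memo (s.drop t.length))).sum := by
  rw [pvF, hm, if_neg hs]
  exact congrArg List.sum (List.attach_map_val (f := fun t : List Char => pvF towels memo (List.drop t.length s)))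

-- ===== B side: pvDp computes pvF at every position =====
lemma dp_getD (towels : List (List Char)) (memo : PySem.Dict (List Char) Int) :
    ∀ (s : List Char) (k : Nat), k ≤ s.length →
      (pvDp towels memo s).getD k 0 = pvF towels memo (s.drop k) := by
  intro s
  induction s with
  | nil =>
    intro k hk
    have hk0 : k = 0 := by simpa using hk
    subst hk0
    simp only [pvDp, List.getD, List.drop_nil]
    rcases h : memo.get? ([] : List Char) with _ | v
    · rw [pvF, h]; simp [PySem.Dict.getD_eq_get?_getD, h]
    · rw [pvF_cached h]; simp [PySem.Dict.getD_eq_get?_getD, h]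
  | cons c rest ih =>
    intro k hk
    cases k with
    | succ k' =>
      simp only [pvDp, List.getD_cons_succ, List.drop_succ_cons]
      exact ih k' (by simpa using hk)
    | zero =>
      simp only [pvDp, List.getD_cons_zero, List.drop_zero]
      rcases h : memo.get? (c :: rest) with _ | w
      · rw [pvF_sum h (by simp)]
        apply congrArg List.sum
        apply List.map_congr_left
        intro t ht
        rw [List.mem_filter] at ht
        simp only [Bool.and_eq_true, Bool.not_eq_true'] at ht
        have h1 : t ≠ [] := by
          intro h'; rw [h'] at ht; simp [List.isEmpty] at ht
        have h2 : t.length ≤ rest.length + 1 := by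
          have := ht.2.2
          simp [PySem.Chars.startswith] at this
          simpa using this.length_le
        obtain ⟨j, hj⟩ : ∃ j, t.length = j + 1 :=
          ⟨t.length - 1, by have := List.length_pos_iff.mpr h1; omega⟩
        rw [hj, Nat.add_sub_cancel, List.drop_succ_cons]
        exact ih j (by omega)
      · rw [pvF_cached h]

-- ===== A side: the invariant carried through the recursion =====
def pvInv (towels : List (List Char)) (memo m : PySem.Dict (List Char) Int) : Prop :=
  (∀ s v, m.get? s = some v → v = pvF towels memo s) ∧
  (∀ s, (memo.get? s).isSome → (m.get? s).isSome)

lemma pvInv_init (towels : List (List Char)) (memo : PySem.Dict (List Char) Int) :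
    pvInv towels memo memo :=
  ⟨fun _ _ h => (pvF_cached h).symm, fun _ h => h⟩

lemma aRun_spec (towels : List (List Char)) (memo : PySem.Dict (List Char) Int)
    (hE : [] ∉ towels) :
    ∀ (fuel : Nat) (s : List Char) (m : PySem.Dict (List Char) Int),
      s.length < fuel → pvInv towels memo m →
      (pvARun towels fuel s m).1 = pvF towels memo s ∧
      pvInv towels memo (pvARun towels fuel s m).2 ∧
      (∀ r, (m.get? r).isSome → ((pvARun towels fuel s m).2.get? r).isSome) := by
  intro fuel
  induction fuel with
  | zero => intro s m hlt _; omega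
  | succ fuel ih =>
    intro s m hlt hinv
    rcases hm : m.get? s with _ | v
    · by_cases hs : s = []
      · subst hs
        have hmm : memo.get? ([] : List Char) = none := by
          rcases h : memo.get? ([] : List Char) with _ | w
          · rfl
          · have := hinv.2 [] (by rw [h]; rfl)
            rw [hm] at this; exact absurd this (by simp)
        simp only [pvARun, hm]
        refine ⟨?_, hinv, fun r h => h⟩
        rw [pvF, hmm]; rfl
      · -- the towel loop
        have hfold : ∀ (ts : List (List Char)), (∀ t ∈ ts, t ∈ towels) →
            ∀ (acc : Int) (m₀ : PySem.Dict (List Char) Int), pvInv towels memo m₀ →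
            (ts.foldl
              (fun (acc : Int × PySem.Dict (List Char) Int) towel =>
                if PySem.Chars.startswith s towel then
                  let p := pvARun towels fuel (s.drop towel.length) acc.2
                  (acc.1 + p.1, p.2)
                else acc)
              (acc, m₀)).1
              = acc + ((ts.filter (fun t => !t.isEmpty && PySem.Chars.startswith s t)).map
                  (fun t => pvF towels memo (s.drop t.length))).sum ∧
            pvInv towels memo
              ((ts.foldl
                (fun (acc : Int × PySem.Dict (List Char) Int) towel =>
                  if PySem.Chars.startswith s towel then
                    let p := pvARun towels fuel (s.drop towel.length) acc.2
                    (acc.1 + p.1, p.2)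
                  else acc)
                (acc, m₀)).2) ∧
            (∀ r, (m₀.get? r).isSome →
              (((ts.foldl
                (fun (acc : Int × PySem.Dict (List Char) Int) towel =>
                  if PySem.Chars.startswith s towel then
                    let p := pvARun towels fuel (s.drop towel.length) acc.2
                    (acc.1 + p.1, p.2)
                  else acc)
                (acc, m₀)).2).get? r).isSome) := by
          intro ts
          induction ts with
          | nil => intro _ acc m₀ hin; exact ⟨by simp, hin, fun r h => h⟩
          | cons t ts iht =>
            intro hmem acc m₀ hin
            by_cases hst : PySem.Chars.startswith s t
            · have ht' : t ≠ [] := fun h => hE (h ▸ hmem t (by simp))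
              have hlen : (s.drop t.length).length < fuel := by
                have h0 : 0 < t.length := List.length_pos_iff.mpr ht'
                have h1 : 0 < s.length := List.length_pos_iff.mpr hs
                simp only [List.length_drop]; omega
              obtain ⟨hv, hin', hmono⟩ := ih (s.drop t.length) m₀ hlen hin
              obtain ⟨hv2, hin2, hmono2⟩ :=
                iht (fun u hu => hmem u (by simp [hu]))
                  (acc + (pvARun towels fuel (s.drop t.length) m₀).1)
                  (pvARun towels fuel (s.drop t.length) m₀).2 hin'
              refine ⟨?_, ?_, ?_⟩
              · simp only [List.foldl_cons, if_pos hst]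
                rw [hv2, hv]
                simp [hst, ht', add_assoc]
              · simpa only [List.foldl_cons, if_pos hst] using hin2
              · intro r hr
                simp only [List.foldl_cons, if_pos hst]
                exact hmono2 r (hmono r hr)
            · obtain ⟨hv2, hin2, hmono2⟩ := iht (fun u hu => hmem u (by simp [hu])) acc m₀ hin
              refine ⟨?_, ?_, ?_⟩
              · simp only [List.foldl_cons, if_neg hst]
                rw [hv2]
                simp [hst]
              · simpa only [List.foldl_cons, if_neg hst] using hin2
              · intro r hr
                simp only [List.foldl_cons, if_neg hst]
                exact hmono2 r hr
        obtain ⟨hv, hin', hmono⟩ := hfold towels (fun _ h => h) 0 m hinv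
        have hmm : memo.get? s = none := by
          rcases h : memo.get? s with _ | w
          · rfl
          · have := hinv.2 s (by rw [h]; rfl)
            rw [hm] at this; exact absurd this (by simp)
        have hval : (towels.foldl
              (fun (acc : Int × PySem.Dict (List Char) Int) towel =>
                if PySem.Chars.startswith s towel then
                  let p := pvARun towels fuel (s.drop towel.length) acc.2
                  (acc.1 + p.1, p.2)
                else acc)
              (0, m)).1 = pvF towels memo s := by
          rw [hv, pvF_sum hmm hs]; ring
        simp only [pvARun, hm, if_neg hs]
        refine ⟨hval, ⟨?_, ?_⟩, ?_⟩
        · intro u w hw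
          rcases eq_or_ne u s with rfl | hne
          · rw [PySem.Dict.get?_insert_self] at hw
            injection hw with hw; rw [← hw, hval]
          · rw [PySem.Dict.get?_insert_of_ne _ _ hne] at hw
            exact hin'.1 u w hw
        · intro u hu
          rcases eq_or_ne u s with rfl | hne
          · rw [PySem.Dict.get?_insert_self]; rfl
          · rw [PySem.Dict.get?_insert_of_ne _ _ hne]
            exact hin'.2 u hu
        · intro r hr
          rcases eq_or_ne r s with rfl | hne
          · rw [PySem.Dict.get?_insert_self]; rfl
          · rw [PySem.Dict.get?_insert_of_ne _ _ hne]
            exact hmono r hr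
    · simp only [pvARun, hm]
      exact ⟨hinv.1 s v hm, hinv, fun r h => h⟩

lemma cached_lookup {design : String} {memo_count : List (String × Int)}
    (h : design ∈ memo_count.map Prod.fst) :
    ((pvToMemo memo_count).get? design.toList).isSome := by
  rw [← PySem.Dict.contains_eq_isSome_get?, PySem.Dict.contains_iff_mem_keys]
  simp only [pvToMemo, PySem.Dict.keys_mk, List.map_map, List.mem_map]
  rw [List.mem_map] at h
  obtain ⟨p, hp, hfst⟩ := h
  exact ⟨p, hp, by simp [Function.comp, hfst]⟩

-- ===== VERDICT (by name: the statement is the Claim_ definition above) =====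
theorem count_arrangements_spec : Claim_equal_count_arrangements := by
  intro design towels memo_count _ hpre
  unfold Spec_count_arrangements count_arrangements count_arrangements_alt
  rcases hm : (pvToMemo memo_count).get? design.toList with _ | v
  · -- not cached: Pre_ leaves design = "" or "" ∉ towels
    have hpre' : design = "" ∨ "" ∉ towels := by
      rcases hpre with h | h | h
      · exact Or.inl h
      · exact absurd (cached_lookup h) (by rw [hm]; simp)
      · exact Or.inr h
    rcases hpre' with rfl | hE
    · -- empty design, uncached: A returns 1, B returns dp[0] = memo.get("",1) = 1
      have hnil : ("" : String).toList = [] := rfl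
      rw [hnil] at hm ⊢
      simp only [pvARun, hm, pvDp, List.getD_cons_zero,
        PySem.Dict.getD_eq_get?_getD, Option.getD_none]
      rw [if_pos trivial]
    · -- "" is not a towel: both sides compute pvF
      have hE' : [] ∉ towels.map String.toList := by
        rw [List.mem_map]
        rintro ⟨t, ht, htl⟩
        exact hE (by rwa [show t = "" from String.ext htl] at ht)
      obtain ⟨hv, -, -⟩ := aRun_spec (towels.map String.toList) (pvToMemo memo_count) hE'
        (design.toList.length + 1) design.toList (pvToMemo memo_count)
        (by omega) (pvInv_init _ _)
      rw [hv, dp_getD _ _ design.toList 0 (by omega), List.drop_zero]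
  · -- cached: both return the cached value
    simp only [pvARun, hm]
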